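-- pv_equiv track=rewrite | github.com/Ascend-Research/AutoGO | utils/graph_utils.py | get_index_based_input_inds
-- ===== SOURCE A (Python) =====
-- import collections
--
-- def get_reverse_adj_dict(src2dsts, allow_self_edges=False):
--     dst2srcs = collections.defaultdict(set)
--     for src, dsts in src2dsts.items():
--         for dst in dsts:
--             if not allow_self_edges:
--                 assert src != dst, "src: {}, dst: {}".format(src, dst)
--             dst2srcs[dst].add(src)
--     return dst2srcs
--
-- def get_index_based_input_inds(node_ids, src2dsts):
--     dst2srcs = get_reverse_adj_dict(src2dsts, allow_self_edges=False)
--     node_id2idx = {nid: ni for ni, nid in enumerate(node_ids)}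
--     graph_input_inds = []
--     for ni, node_id in enumerate(node_ids):
--         input_ids = dst2srcs[node_id]
--         node_input_inds = [node_id2idx[_id] for _id in input_ids]
--         node_input_inds.sort()
--         assert all(i < ni for i in node_input_inds), "{}, {}".format(ni, node_input_inds)
--         graph_input_inds.append(node_input_inds)
--     return graph_input_inds
-- ===== SOURCE B (Python) =====
-- def get_index_based_input_inds(node_ids, src2dsts):
--     # Brute force per node: for each node, scan src2dsts directly and collect the
--     # indices of its predecessors; no reverse-adjacency dict is ever built.
--     node_id2idx = {nid: ni for ni, nid in enumerate(node_ids)}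
--     graph_input_inds = []
--     for node_id in node_ids:
--         inds = {node_id2idx[src] for src, dsts in src2dsts.items() if node_id in dsts}
--         graph_input_inds.append(sorted(inds))
--     return graph_input_inds
-- ===== Notes on version B (the rewrite author's own statement) =====
-- stated objective: alternative
-- what changed: B builds no reverse-adjacency structure at all: for each node it scans src2dsts directly, collecting predecessor indices into a set comprehension, instead of A's two-phase build of a defaultdict reverse-adjacency followed by a gather-and-translate pass.
import Mathlib
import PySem

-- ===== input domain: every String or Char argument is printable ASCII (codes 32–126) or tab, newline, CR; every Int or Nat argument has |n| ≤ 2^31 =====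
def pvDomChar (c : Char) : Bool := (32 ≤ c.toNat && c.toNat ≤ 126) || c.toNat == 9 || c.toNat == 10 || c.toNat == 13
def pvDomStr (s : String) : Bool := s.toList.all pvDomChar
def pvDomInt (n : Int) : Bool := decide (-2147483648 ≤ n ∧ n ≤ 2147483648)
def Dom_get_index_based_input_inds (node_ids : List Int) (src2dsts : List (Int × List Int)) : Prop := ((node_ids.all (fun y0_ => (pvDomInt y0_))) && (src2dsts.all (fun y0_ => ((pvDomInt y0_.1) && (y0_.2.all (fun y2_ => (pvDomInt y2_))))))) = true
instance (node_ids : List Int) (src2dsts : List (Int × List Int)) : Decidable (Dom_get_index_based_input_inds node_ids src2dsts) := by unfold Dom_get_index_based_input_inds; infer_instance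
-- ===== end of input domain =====

-- B drops A's reverse-adjacency build entirely and does a per-node direct scan of src2dsts;
-- objective: alternative decomposition (not faster).


-- ===== PORT A =====
-- get_reverse_adj_dict(src2dsts, allow_self_edges=False); the `assert src != dst` raises exactly
-- on self-edges, which Pre_ excludes; defaultdict(set)'s dst2srcs[dst].add(src) is Dict.modify.
def pvRevAdj (src2dsts : List (Int × List Int)) : PySem.Dict Int (PySem.Set Int) :=
  src2dsts.foldl
    (fun d p => p.2.foldl (fun d dst => d.modify dst PySem.Set.empty (fun s => s.add p.1)) d)
    PySem.Dict.empty

-- {nid: ni for ni, nid in enumerate(node_ids)} (the identical line occurs in A and in B)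
def pvIdxDict (node_ids : List Int) : PySem.Dict Int Int :=
  (PySem.List.enumerate node_ids).foldl (fun d p => d.insert p.2 p.1) PySem.Dict.empty

def get_index_based_input_inds (node_ids : List Int) (src2dsts : List (Int × List Int)) : List (List Int) :=
  let dst2srcs := pvRevAdj src2dsts
  let node_id2idx := pvIdxDict node_ids
  -- node_id2idx[_id] raises KeyError when _id ∉ node_ids — excluded by Pre_, where getD is exact;
  -- the `assert all(i < ni …)` raises exactly on inputs Pre_ excludes.
  (PySem.List.enumerate node_ids).foldl
    (fun acc p =>
      let input_ids := dst2srcs.getD p.2 PySem.Set.empty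
      let node_input_inds :=
        PySem.List.sorted (input_ids.map (fun _id => node_id2idx.getD _id (-1))) (fun x => x)
      acc ++ [node_input_inds]) []

-- ===== PORT B =====
-- Source B: per node, one direct scan of src2dsts — the set comprehension
-- {node_id2idx[src] for src, dsts in src2dsts.items() if node_id in dsts};
-- node_id2idx[src] raises KeyError when src ∉ node_ids (excluded by Pre_, where getD is exact)
def get_index_based_input_inds_alt (node_ids : List Int) (src2dsts : List (Int × List Int)) : List (List Int) :=
  let node_id2idx := pvIdxDict node_ids
  node_ids.foldl
    (fun acc node_id =>
      let inds := PySem.Set.ofList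
        ((src2dsts.filter (fun q => q.2.contains node_id)).map
          (fun q => node_id2idx.getD q.1 (-1)))
      acc ++ [PySem.List.sorted inds (fun x => x)]) []

-- ===== PRECONDITION & SPEC =====
-- last index of x in xs (Python's {nid: ni …} keeps the LAST occurrence); meaningful when x ∈ xs
def pvLastIdx (xs : List Int) (x : Int) : Int :=
  (xs.length : Int) - 1 - (xs.reverse.idxOf x : Int)

-- exactly the inputs on which Python A returns: no self-edge (AssertionError), every source of an
-- edge into a node id is itself a node id (KeyError), and every such edge goes forward in
-- node_ids order, measured at the source's LAST occurrence (the all(i < ni) assert).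
def Pre_get_index_based_input_inds (node_ids : List Int) (src2dsts : List (Int × List Int)) : Prop :=
  (∀ p ∈ src2dsts, ∀ dst ∈ p.2, p.1 ≠ dst) ∧
  (∀ p ∈ src2dsts, ∀ dst ∈ p.2, dst ∈ node_ids → p.1 ∈ node_ids) ∧
  (∀ i ∈ List.range node_ids.length, ∀ p ∈ src2dsts,
      node_ids.getD i 0 ∈ p.2 → pvLastIdx node_ids p.1 < (i : Int))
instance (node_ids : List Int) (src2dsts : List (Int × List Int)) : Decidable (Pre_get_index_based_input_inds node_ids src2dsts) := by unfold Pre_get_index_based_input_inds; infer_instance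

def pvWitness_get_index_based_input_inds : List Int × (List (Int × List Int)) :=
  ([1, 2, 3], [(1, [2, 3]), (2, [3])])

def Spec_get_index_based_input_inds (node_ids : List Int) (src2dsts : List (Int × List Int)) (out : List (List Int)) : Prop := out = get_index_based_input_inds_alt node_ids src2dsts
instance (node_ids : List Int) (src2dsts : List (Int × List Int)) (out : List (List Int)) : Decidable (Spec_get_index_based_input_inds node_ids src2dsts out) := by unfold Spec_get_index_based_input_inds; infer_instance

-- ===== CLAIM (what is proved, stated in full; the proofs are below) =====
def Claim_equal_get_index_based_input_inds : Prop := ∀ (node_ids : List Int) (src2dsts : List (Int × List Int)), Dom_get_index_based_input_inds node_ids src2dsts → Pre_get_index_based_input_inds node_ids src2dsts → Spec_get_index_based_input_inds node_ids src2dsts (get_index_based_input_inds node_ids src2dsts)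

-- ===== LEMMAS AND PROOFS =====

-- the enumerate-fold dict ignores keys not in xs
theorem pvIdx_getD_not_mem (xs : List Int) (x : Int) (s : Int) (d0 : PySem.Dict Int Int)
    (dflt : Int) (hx : x ∉ xs) :
    ((PySem.List.enumerate xs s).foldl (fun d p => d.insert p.2 p.1) d0).getD x dflt
      = d0.getD x dflt := by
  induction xs generalizing s d0 with
  | nil => simp [PySem.List.enumerate_nil]
  | cons a t ih =>
      simp only [PySem.List.enumerate_cons, List.foldl_cons]
      rw [ih _ _ (by simp_all)]
      exact PySem.Dict.getD_insert_of_ne _ _ _ (by simp_all)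

-- the enumerate-fold dict maps a member to SOME index of it
theorem pvIdx_getD_mem (xs : List Int) (x : Int) (s : Int) (d0 : PySem.Dict Int Int)
    (dflt : Int) (hx : x ∈ xs) :
    ∃ i : Nat, xs[i]? = some x ∧
      ((PySem.List.enumerate xs s).foldl (fun d p => d.insert p.2 p.1) d0).getD x dflt
        = s + (i : Int) := by
  induction xs generalizing s d0 with
  | nil => simp at hx
  | cons a t ih =>
      simp only [PySem.List.enumerate_cons, List.foldl_cons]
      by_cases ht : x ∈ t
      · obtain ⟨i, hget, hval⟩ := ih (s + 1) (d0.insert a s) ht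
        exact ⟨i + 1, by simpa using hget, by rw [hval]; push_cast; ring⟩
      · have hxa : x = a := by
          cases hx with
          | head => rfl
          | tail _ h => exact absurd h ht
        refine ⟨0, by simp [hxa], ?_⟩
        rw [pvIdx_getD_not_mem t x (s + 1) _ dflt ht, hxa]
        simp [PySem.Dict.getD_insert_self]

-- lookup in node_id2idx is injective on members of node_ids
theorem pvIdx_inj (xs : List Int) (a b : Int) (dflt : Int) (ha : a ∈ xs) (hb : b ∈ xs)
    (h : (pvIdxDict xs).getD a dflt = (pvIdxDict xs).getD b dflt) : a = b := by
  obtain ⟨i, hi, hvi⟩ := pvIdx_getD_mem xs a 0 PySem.Dict.empty dflt ha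
  obtain ⟨j, hj, hvj⟩ := pvIdx_getD_mem xs b 0 PySem.Dict.empty dflt hb
  unfold pvIdxDict at h
  rw [hvi, hvj] at h
  have : i = j := by omega
  subst this
  rw [hi] at hj
  exact Option.some_injective _ hj

-- A's inner loop: membership in the per-key set
theorem pvA_inner_mem (dsts : List Int) (src : Int) (d : PySem.Dict Int (PySem.Set Int))
    (k x : Int) :
    x ∈ (dsts.foldl (fun d dst => d.modify dst PySem.Set.empty (fun s => s.add src)) d).getD k
          PySem.Set.empty
      ↔ x ∈ d.getD k PySem.Set.empty ∨ (x = src ∧ k ∈ dsts) := by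
  induction dsts generalizing d with
  | nil => simp
  | cons a t ih =>
      simp only [List.foldl_cons]
      rw [ih]
      by_cases hk : k = a
      · subst hk
        rw [PySem.Dict.getD_modify_self]
        rw [PySem.Set.mem_add]
        simp only [List.mem_cons] ; tauto
      · rw [PySem.Dict.getD_modify_of_ne _ _ _ hk]
        simp [hk]

-- A's reverse-adjacency build: membership characterisation
theorem pvA_mem (l : List (Int × List Int)) (d : PySem.Dict Int (PySem.Set Int)) (k x : Int) :
    x ∈ (l.foldl
          (fun d p => p.2.foldl (fun d dst => d.modify dst PySem.Set.empty (fun s => s.add p.1)) d)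
          d).getD k PySem.Set.empty
      ↔ x ∈ d.getD k PySem.Set.empty ∨ ∃ p ∈ l, p.1 = x ∧ k ∈ p.2 := by
  induction l generalizing d with
  | nil => simp
  | cons a t ih =>
      simp only [List.foldl_cons]
      rw [ih, pvA_inner_mem]
      simp only [List.mem_cons, exists_eq_or_imp]
      tauto

-- the per-key sets of A's build are duplicate-free
theorem pvA_inner_nodup (dsts : List Int) (src : Int) (d : PySem.Dict Int (PySem.Set Int))
    (hd : ∀ k, (d.getD k PySem.Set.empty).Nodup) (k : Int) :
    ((dsts.foldl (fun d dst => d.modify dst PySem.Set.empty (fun s => s.add src)) d).getD k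
        PySem.Set.empty).Nodup := by
  induction dsts generalizing d with
  | nil => exact hd k
  | cons b bs ihb =>
      simp only [List.foldl_cons]
      refine ihb _ (fun j => ?_)
      by_cases hj : j = b
      · subst hj
        rw [PySem.Dict.getD_modify_self]
        exact PySem.Set.nodup_add _ _ (hd j)
      · rw [PySem.Dict.getD_modify_of_ne _ _ _ hj]
        exact hd j

theorem pvA_nodup (l : List (Int × List Int)) (d : PySem.Dict Int (PySem.Set Int))
    (hd : ∀ k, (d.getD k PySem.Set.empty).Nodup) (k : Int) :
    ((l.foldl
        (fun d p => p.2.foldl (fun d dst => d.modify dst PySem.Set.empty (fun s => s.add p.1)) d)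
        d).getD k PySem.Set.empty).Nodup := by
  induction l generalizing d with
  | nil => exact hd k
  | cons a t ih =>
      simp only [List.foldl_cons]
      exact ih _ (fun k' => pvA_inner_nodup a.2 a.1 d hd k')

-- per node id, A's sorted translated list equals B's sorted comprehension set
theorem pv_entry_eq (node_ids : List Int) (src2dsts : List (Int × List Int))
    (hsrc : ∀ p ∈ src2dsts, ∀ dst ∈ p.2, dst ∈ node_ids → p.1 ∈ node_ids)
    (k : Int) (hk : k ∈ node_ids) :
    PySem.List.sorted
        (((pvRevAdj src2dsts).getD k PySem.Set.empty).map
          (fun _id => (pvIdxDict node_ids).getD _id (-1))) (fun x => x)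
      = PySem.List.sorted
          (PySem.Set.ofList
            ((src2dsts.filter (fun q => q.2.contains k)).map
              (fun q => (pvIdxDict node_ids).getD q.1 (-1)))) (fun x => x) := by
  have hAnodup : (((pvRevAdj src2dsts).getD k PySem.Set.empty)).Nodup := by
    unfold pvRevAdj
    exact pvA_nodup src2dsts PySem.Dict.empty (by simp) k
  have hAmem : ∀ x, x ∈ (pvRevAdj src2dsts).getD k PySem.Set.empty
      ↔ ∃ p ∈ src2dsts, p.1 = x ∧ k ∈ p.2 := by
    intro x
    unfold pvRevAdj
    rw [pvA_mem]
    simp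
  have hAmem_nid : ∀ x ∈ (pvRevAdj src2dsts).getD k PySem.Set.empty, x ∈ node_ids := by
    intro x hx
    obtain ⟨p, hp, hpx, hpk⟩ := (hAmem x).1 hx
    exact hpx ▸ hsrc p hp k hpk hk
  have hmapnodup :
      (((pvRevAdj src2dsts).getD k PySem.Set.empty).map
        (fun _id => (pvIdxDict node_ids).getD _id (-1))).Nodup := by
    refine hAnodup.map_on (fun a ha b hb hab => ?_)
    exact pvIdx_inj node_ids a b (-1) (hAmem_nid a ha) (hAmem_nid b hb) hab
  apply PySem.List.sorted_eq_sorted_of_perm _ _ _ (fun a b h => h)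
  rw [List.perm_ext_iff_of_nodup hmapnodup (PySem.Set.nodup_ofList _)]
  intro y
  rw [PySem.Set.mem_ofList]
  simp only [List.mem_map, List.mem_filter, List.contains_eq_mem, decide_eq_true_eq]
  constructor
  · rintro ⟨x, hx, rfl⟩
    obtain ⟨p, hp, rfl, hpk⟩ := (hAmem x).1 hx
    exact ⟨p, ⟨hp, hpk⟩, rfl⟩
  · rintro ⟨p, ⟨hp, hpk⟩, rfl⟩
    exact ⟨p.1, (hAmem p.1).2 ⟨p, hp, rfl, hpk⟩, rfl⟩

-- a fold over enumerate whose body uses only the element equals the fold over the list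
theorem pv_foldl_enumerate_snd {a b : Type} (xs : List a) (s : Int) (g : b -> a -> b) (init : b) :
    (PySem.List.enumerate xs s).foldl (fun acc p => g acc p.2) init = xs.foldl g init := by
  induction xs generalizing s init with
  | nil => simp [PySem.List.enumerate_nil]
  | cons x t ih => simp only [PySem.List.enumerate_cons, List.foldl_cons]; exact ih _ _

-- ===== VERDICT (by name: the statement is the Claim_ definition above) =====
theorem get_index_based_input_inds_spec : Claim_equal_get_index_based_input_inds := by
  intro node_ids src2dsts _hdom hpre
  unfold Spec_get_index_based_input_inds
  unfold get_index_based_input_inds get_index_based_input_inds_alt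
  show (PySem.List.enumerate node_ids).foldl
      (fun acc p => acc ++ [PySem.List.sorted
        (((pvRevAdj src2dsts).getD p.2 PySem.Set.empty).map
          (fun _id => (pvIdxDict node_ids).getD _id (-1))) (fun x => x)]) []
    = node_ids.foldl
      (fun acc node_id => acc ++ [PySem.List.sorted
        (PySem.Set.ofList ((src2dsts.filter (fun q => q.2.contains node_id)).map
          (fun q => (pvIdxDict node_ids).getD q.1 (-1)))) (fun x => x)]) []
  rw [pv_foldl_enumerate_snd node_ids 0
      (fun acc node_id => acc ++ [PySem.List.sorted
        (((pvRevAdj src2dsts).getD node_id PySem.Set.empty).map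
          (fun _id => (pvIdxDict node_ids).getD _id (-1))) (fun x => x)]) []]
  apply PySem.List.foldl_congr_mem
  intro acc k hk
  rw [pv_entry_eq node_ids src2dsts hpre.2.1 k hk]
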